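-- pv_equiv track=rewrite | github.com/andreagrandi/aoc_2019 | aoc/aoc_04.py | has_double_digits
-- ===== SOURCE A (Python) =====
-- def has_double_digits(number):
--     double_digits = ['11', '22', '33', '44', '55', '66', '77', '88', '99']
--     digits = str(number)
--
--     for i in range(len(digits) - 1):
--         if digits[i:i+2] in double_digits:
--             if i == 0:
--                 if digits[i] != digits[i+2]:
--                     return True
--             elif 0 < i < len(digits) - 2:
--                 if digits[i] != digits[i+2] and digits[i] != digits[i-1]:
--                     return True
--             else:
--                 if digits[i] != digits[i-1]:
--                     return True
--     return False
-- ===== SOURCE B (Python) =====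
-- def has_double_digits(number):
--     s = str(number)
--     i = 0
--     while i < len(s):
--         j = i + 1
--         while j < len(s) and s[j] == s[i]:
--             j += 1
--         if j - i == 2 and s[i] != '0':
--             return True
--         i = j
--     return False
-- ===== Notes on version B (the rewrite author's own statement) =====
-- stated objective: simpler
-- what changed: Replaced A's sliding-window pair scan over double_digits with position/neighbour special-casing (i==0 / middle / end branches) by a single run-length scan that jumps over each maximal run of equal characters and returns True iff some run has length exactly 2 and its character is not '0' (matching A's list, which omits '00').
-- outside the precondition, e.g. on has_double_digits(11): A raises IndexError, B returns True; on has_double_digits(22): A raises IndexError, B returns True; on has_double_digits(99): A raises IndexError, B returns True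
import Mathlib
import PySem

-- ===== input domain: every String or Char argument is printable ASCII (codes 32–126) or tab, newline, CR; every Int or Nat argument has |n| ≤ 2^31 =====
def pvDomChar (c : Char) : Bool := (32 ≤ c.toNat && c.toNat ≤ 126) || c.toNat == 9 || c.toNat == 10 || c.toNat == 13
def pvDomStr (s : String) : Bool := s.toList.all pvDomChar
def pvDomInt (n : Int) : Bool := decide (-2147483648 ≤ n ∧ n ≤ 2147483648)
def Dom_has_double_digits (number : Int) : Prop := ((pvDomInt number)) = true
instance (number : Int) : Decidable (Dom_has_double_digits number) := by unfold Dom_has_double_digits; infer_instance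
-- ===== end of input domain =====

-- B replaces A's sliding-window pair scan (with its neighbour/position special-casing) by a
-- run-length scan over maximal runs, firing iff a run has length exactly 2 and its char is not '0': simpler.

-- ===== PORT A =====
-- double_digits = ['11', …, '99']
def ddListA : List (List Char) :=
  [['1','1'],['2','2'],['3','3'],['4','4'],['5','5'],['6','6'],['7','7'],['8','8'],['9','9']]

-- for i in range(len(digits) - 1): … early return True, else fall through to next i
def loopA (ds : List Char) (i : Nat) : Bool :=
  if i < ds.length - 1 then
    let hit : Bool :=
      if PySem.List.slice ds (some (i : Int)) (some ((i : Int) + 2)) ∈ ddListA then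
        if i = 0 then
          -- digits[i] != digits[i+2]  (Python raises IndexError when i+2 = len; Pre_ excludes exactly those inputs)
          decide (PySem.List.pyGetD ds (i : Int) ' ' ≠ PySem.List.pyGetD ds ((i : Int) + 2) ' ')
        else if 0 < i ∧ (i : Int) < (ds.length : Int) - 2 then
          decide (PySem.List.pyGetD ds (i : Int) ' ' ≠ PySem.List.pyGetD ds ((i : Int) + 2) ' '
                  ∧ PySem.List.pyGetD ds (i : Int) ' ' ≠ PySem.List.pyGetD ds ((i : Int) - 1) ' ')
        else
          decide (PySem.List.pyGetD ds (i : Int) ' ' ≠ PySem.List.pyGetD ds ((i : Int) - 1) ' ')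
      else false
    if hit then true else loopA ds (i + 1)
  else false
termination_by ds.length - i
decreasing_by omega

def has_double_digits (number : Int) : Bool :=
  loopA (PySem.Int.toChars number) 0

-- ===== PORT B =====
-- inner while: j += 1 while j < len(s) and s[j] == s[i]
def runEndB (s : List Char) (c : Char) (j : Nat) : Nat :=
  if j < s.length ∧ s[j]? = some c then runEndB s c (j + 1) else j
termination_by s.length - j
decreasing_by omega

-- needed by loopB's termination proof (the inner while never moves j backwards)
theorem runEndB_ge (s : List Char) (c : Char) (j : Nat) : j ≤ runEndB s c j := by
  fun_induction runEndB <;> omega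

-- outer while: one iteration per maximal run, i jumps to the run's end
def loopB (s : List Char) (i : Nat) : Bool :=
  if h : i < s.length then
    let j := runEndB s s[i] (i + 1)
    if j - i = 2 ∧ s[i] ≠ '0' then true else loopB s j
  else false
termination_by s.length - i
decreasing_by have := runEndB_ge s s[i] (i + 1); omega

def has_double_digits_alt (number : Int) : Bool :=
  loopB (PySem.Int.toChars number) 0

-- ===== PRECONDITION & SPEC =====
-- Pre_ excludes exactly the nine inputs 11, 22, …, 99 (two equal nonzero digits), on which
-- A raises IndexError (its i == 0 branch reads digits[2] of a length-2 string).
def Pre_has_double_digits (number : Int) : Prop :=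
  number ∉ ([11, 22, 33, 44, 55, 66, 77, 88, 99] : List Int)
instance (number : Int) : Decidable (Pre_has_double_digits number) := by
  unfold Pre_has_double_digits; infer_instance

def pvWitness_has_double_digits : Int := 112

def Spec_has_double_digits (number : Int) (out : Bool) : Prop := out = has_double_digits_alt number
instance (number : Int) (out : Bool) : Decidable (Spec_has_double_digits number out) := by
  unfold Spec_has_double_digits; infer_instance

-- ===== CLAIM (what is proved, stated in full; the proofs are below) =====
def Claim_equal_has_double_digits : Prop := ∀ (number : Int), Dom_has_double_digits number → Pre_has_double_digits number → Spec_has_double_digits number (has_double_digits number)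

-- ===== LEMMAS AND PROOFS =====

-- the character sets A's double_digits list singles out
def nineChars : List Char := ['1','2','3','4','5','6','7','8','9']
def digitChars : List Char := ['0','1','2','3','4','5','6','7','8','9']

-- common characterisation: an exactly-length-2 run of a non-'0' char starts at k
def HitAt (ds : List Char) (k : Nat) : Prop :=
  ∃ c, ds[k]? = some c ∧ ds[k+1]? = some c ∧ ds[k+2]? ≠ some c ∧
    (k = 0 ∨ ds[k-1]? ≠ some c) ∧ c ≠ '0'

-- any two equal adjacent chars of the scanned string are decimal digits
def HDig (ds : List Char) : Prop :=
  ∀ k c, ds[k]? = some c → ds[k+1]? = some c → c ∈ digitChars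

-- the string is not a two-char nonzero double (A's IndexError shape)
def HSafe (ds : List Char) : Prop :=
  ¬ (ds.length = 2 ∧ ∃ c, ds[0]? = some c ∧ ds[1]? = some c ∧ c ∈ nineChars)

theorem mem_ddListA (c d : Char) : [c, d] ∈ ddListA ↔ (c = d ∧ c ∈ nineChars) := by
  constructor
  · intro h; fin_cases h <;> refine ⟨rfl, by decide⟩
  · rintro ⟨rfl, h⟩; fin_cases h <;> decide

theorem digit_nine (c : Char) (h : c ∈ digitChars) : c ∈ nineChars ↔ c ≠ '0' := by
  fin_cases h <;> decide

theorem nine_ne_zero (c : Char) (h : c ∈ nineChars) : c ≠ '0' := by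
  fin_cases h <;> decide

theorem getElem?_some (ds : List Char) (k : Nat) (h : k < ds.length) : ds[k]? = some ds[k] :=
  List.getElem?_eq_getElem h

theorem pyGetD_nat (ds : List Char) (k : Nat) (h : k < ds.length) :
    PySem.List.pyGetD ds (k : Int) ' ' = ds[k] := by
  rw [PySem.List.pyGetD_eq_getElem ds ' ' (by omega) (by exact_mod_cast h)]
  simp

theorem step_iff (ds : List Char) (i : Nat)
    (ih : loopA ds (i+1) = true ↔ ∃ k, i+1 ≤ k ∧ HitAt ds k) (hit : Bool)
    (hhit : hit = true ↔ HitAt ds i) :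
    ((if hit then true else loopA ds (i+1)) = true ↔ ∃ k, i ≤ k ∧ HitAt ds k) := by
  cases hit with
  | true => simp only [if_pos]; simp only [true_iff] at hhit ⊢
            exact ⟨i, le_refl i, hhit⟩
  | false =>
    simp only [Bool.false_eq_true, if_false, false_iff] at hhit ⊢
    rw [ih]
    constructor
    · rintro ⟨k, hk, h⟩; exact ⟨k, by omega, h⟩
    · rintro ⟨k, hk, h⟩
      rcases Nat.eq_or_lt_of_le hk with rfl | hlt
      · exact absurd h hhit
      · exact ⟨k, by omega, h⟩

theorem hitAt_iff (ds : List Char) (i : Nat) (hi1 : i + 1 < ds.length)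
    (heq : ds[i] = ds[i+1]) (hnine : ds[i] ∈ nineChars) :
    HitAt ds i ↔ (ds[i+2]? ≠ some ds[i] ∧ (i = 0 ∨ ds[i-1]? ≠ some ds[i])) := by
  constructor
  · rintro ⟨c, h1, h2, h3, h4, h5⟩
    rw [getElem?_some ds i (by omega)] at h1
    obtain rfl : ds[i] = c := by injection h1
    exact ⟨h3, h4⟩
  · rintro ⟨h3, h4⟩
    exact ⟨ds[i], getElem?_some ds i (by omega),
      by rw [getElem?_some ds (i+1) hi1]; exact congrArg some heq.symm,
      h3, h4, nine_ne_zero _ hnine⟩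

theorem not_hitAt (ds : List Char) (hdig : HDig ds) (i : Nat) (hi1 : i + 1 < ds.length)
    (hnot : ¬ (ds[i] = ds[i+1] ∧ ds[i] ∈ nineChars)) : ¬ HitAt ds i := by
  rintro ⟨c, h1, h2, h3, h4, h5⟩
  have e1 : ds[i] = c := by rw [getElem?_some ds i (by omega)] at h1; exact Option.some.inj h1
  have e2 : ds[i+1] = c := by rw [getElem?_some ds (i+1) hi1] at h2; exact Option.some.inj h2
  have hd := hdig i c h1 h2
  refine hnot ⟨e1.trans e2.symm, ?_⟩
  rw [e1]; exact (digit_nine c hd).2 h5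

theorem loopA_iff (ds : List Char) (hdig : HDig ds) (hsafe : HSafe ds) :
    ∀ d i, ds.length - i ≤ d → (loopA ds i = true ↔ ∃ k, i ≤ k ∧ HitAt ds k) := by
  intro d
  induction d with
  | zero =>
    intro i hle
    rw [loopA]
    simp only [if_neg (by omega : ¬ i < ds.length - 1), Bool.false_eq_true, false_iff]
    rintro ⟨k, hk, c, h1, h2, _⟩
    obtain ⟨hlt, -⟩ := List.getElem?_eq_some_iff.1 h2
    omega
  | succ d ih =>
    intro i hle
    by_cases hc : i < ds.length - 1
    · have hi : i < ds.length := by omega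
      have hi1 : i + 1 < ds.length := by omega
      rw [loopA]
      simp only [if_pos hc]
      have hslice : PySem.List.slice ds (some (i : Int)) (some ((i : Int) + 2)) = [ds[i], ds[i+1]] := by
        rw [show ((i : Int) + 2) = ((i : Int) + ((2 : Nat) : Int)) by norm_num,
          PySem.List.slice_natCast_add, List.drop_eq_getElem_cons hi,
          List.drop_eq_getElem_cons hi1]
        rfl
      rw [hslice]
      apply step_iff ds i (ih (i+1) (by omega))
      by_cases hmem : [ds[i], ds[i+1]] ∈ ddListA
      · obtain ⟨heq, hnine⟩ := (mem_ddListA _ _).1 hmem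
        rw [if_pos hmem, hitAt_iff ds i hi1 heq hnine]
        by_cases h0 : i = 0
        · subst h0
          have hlen : ds.length ≠ 2 := by
            intro h2
            exact hsafe ⟨h2, ds[0], getElem?_some ds 0 hi,
              by rw [getElem?_some ds 1 hi1]; exact congrArg some heq.symm, hnine⟩
          have h2l : 2 < ds.length := by omega
          rw [if_pos rfl]
          rw [show ((0:Nat) : Int) + 2 = ((2:Nat) : Int) by norm_num]
          rw [pyGetD_nat ds 0 hi, pyGetD_nat ds 2 h2l]
          simp only [decide_eq_true_eq]
          rw [getElem?_some ds 2 h2l]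
          constructor
          · intro h; exact ⟨fun e => h (Option.some.inj e).symm, Or.inl (by trivial)⟩
          · rintro ⟨h, -⟩; exact fun e => h (congrArg some e.symm)
        · rw [if_neg h0]
          have h0' : 0 < i := by omega
          by_cases hmid : (i : Int) < (ds.length : Int) - 2
          · have hi2 : i + 2 < ds.length := by omega
            rw [if_pos ⟨h0', hmid⟩]
            rw [show ((i:Nat) : Int) + 2 = (((i+2:Nat)) : Int) by push_cast; ring]
            rw [show ((i:Nat) : Int) - 1 = (((i-1:Nat)) : Int) by push_cast [h0']; ring]
            rw [pyGetD_nat ds i hi, pyGetD_nat ds (i+2) hi2, pyGetD_nat ds (i-1) (by omega)]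
            simp only [decide_eq_true_eq]
            rw [getElem?_some ds (i+2) hi2, getElem?_some ds (i-1) (by omega)]
            constructor
            · rintro ⟨ha, hb⟩
              exact ⟨fun e => ha (Option.some.inj e).symm,
                Or.inr (fun e => hb (Option.some.inj e).symm)⟩
            · rintro ⟨ha, hb⟩
              refine ⟨fun e => ha (congrArg some e.symm), ?_⟩
              rcases hb with hb | hb
              · omega
              · exact fun e => hb (congrArg some e.symm)
          · have hi2 : i + 2 = ds.length := by omega
            rw [if_neg (by rintro ⟨-, h⟩; exact hmid h)]
            rw [show ((i:Nat) : Int) - 1 = (((i-1:Nat)) : Int) by push_cast [h0']; ring]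
            rw [pyGetD_nat ds i hi, pyGetD_nat ds (i-1) (by omega)]
            simp only [decide_eq_true_eq]
            have hnone : ds[i+2]? = none := by
              rw [List.getElem?_eq_none_iff]; omega
            rw [hnone, getElem?_some ds (i-1) (by omega)]
            constructor
            · intro h; exact ⟨by simp, Or.inr (fun e => h (Option.some.inj e).symm)⟩
            · rintro ⟨-, hb⟩
              rcases hb with hb | hb
              · omega
              · exact fun e => hb (congrArg some e.symm)
      · rw [if_neg hmem]
        simp only [false_iff, Bool.false_eq_true]
        exact not_hitAt ds hdig i hi1 (fun h => hmem ((mem_ddListA _ _).2 h))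
    · rw [loopA]
      simp only [if_neg hc, Bool.false_eq_true, false_iff]
      rintro ⟨k, hk, c, h1, h2, _⟩
      obtain ⟨hlt, -⟩ := List.getElem?_eq_some_iff.1 h2
      omega

theorem runEndB_run (s : List Char) (c : Char) (j : Nat) :
    ∀ k, j ≤ k → k < runEndB s c j → s[k]? = some c := by
  fun_induction runEndB with
  | case1 j h ih =>
    intro k hk hlt
    rcases Nat.eq_or_lt_of_le hk with rfl | h2
    · exact h.2
    · exact ih k h2 hlt
  | case2 j h =>
    intro k hk hlt; omega

theorem runEndB_stop (s : List Char) (c : Char) (j : Nat) :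
    s[runEndB s c j]? ≠ some c := by
  fun_induction runEndB with
  | case1 j h ih => exact ih
  | case2 j h =>
    intro hc
    rw [Decidable.not_and_iff_not_or_not] at h
    rcases h with h | h
    · rw [List.getElem?_eq_none_iff.2 (by omega)] at hc; cases hc
    · exact h hc

theorem loopB_iff (ds : List Char) :
    ∀ d i, ds.length - i ≤ d →
      (i = 0 ∨ ∀ c, ds[i]? = some c → ds[i-1]? ≠ some c) →
      (loopB ds i = true ↔ ∃ k, i ≤ k ∧ HitAt ds k) := by
  intro d
  induction d with
  | zero =>
    intro i hle hstart
    rw [loopB]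
    simp only [dif_neg (by omega : ¬ i < ds.length), Bool.false_eq_true, false_iff]
    rintro ⟨k, hk, c, h1, h2, _⟩
    obtain ⟨hlt, -⟩ := List.getElem?_eq_some_iff.1 h1
    omega
  | succ d ih =>
    intro i hle hstart
    by_cases hi : i < ds.length
    · rw [loopB]
      simp only [dif_pos hi]
      set c := ds[i] with hc
      set j := runEndB ds c (i + 1) with hj
      have hj1 : i + 1 ≤ j := runEndB_ge ds c (i + 1)
      have hrun : ∀ k, i ≤ k → k < j → ds[k]? = some c := by
        intro k h1 h2
        rcases Nat.eq_or_lt_of_le h1 with h3 | h3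
        · rw [← h3]; exact getElem?_some ds i hi
        · exact runEndB_run ds c (i+1) k h3 h2
      have hstop : ds[j]? ≠ some c := runEndB_stop ds c (i + 1)
      -- the index after the run is again a run boundary
      have hstart' : j = 0 ∨ ∀ c', ds[j]? = some c' → ds[j-1]? ≠ some c' := by
        right
        intro c' hjc' hj1c'
        have : ds[j-1]? = some c := hrun (j-1) (by omega) (by omega)
        rw [this] at hj1c'
        obtain rfl : c' = c := (Option.some.inj hj1c').symm
        exact hstop hjc'
      -- HitAt holds at i iff the current run has length exactly 2 and c ≠ '0'
      have hhit : HitAt ds i ↔ (j - i = 2 ∧ c ≠ '0') := by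
        constructor
        · rintro ⟨c', h1, h2, h3, h4, h5⟩
          obtain rfl : c' = c := by
            rw [getElem?_some ds i hi] at h1; exact (Option.some.inj h1).symm
          have hij1 : i + 1 < j := by
            rcases Nat.lt_or_ge (i+1) j with h | h
            · exact h
            · have : j = i + 1 := by omega
              rw [← this] at h2; exact absurd h2 hstop
          have hij2 : j ≤ i + 2 := by
            by_contra h
            exact h3 (hrun (i+2) (by omega) (by omega))
          exact ⟨by omega, h5⟩
        · rintro ⟨h2, h5⟩
          refine ⟨c, getElem?_some ds i hi, hrun (i+1) (by omega) (by omega), ?_, ?_, h5⟩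
          · rw [show i + 2 = j by omega]; exact hstop
          · rcases hstart with h | h
            · exact Or.inl h
            · exact Or.inr (h c (getElem?_some ds i hi))
      -- no hit starts strictly inside the run
      have hmid : ∀ k, i < k → k < j → ¬ HitAt ds k := by
        rintro k h1 h2 ⟨c', hk1, hk2, hk3, hk4, hk5⟩
        have e : ds[k]? = some c := hrun k (by omega) h2
        rw [e] at hk1
        obtain rfl : c' = c := (Option.some.inj hk1).symm
        rcases hk4 with h | h
        · omega
        · exact h (hrun (k-1) (by omega) (by omega))
      by_cases hcond : j - i = 2 ∧ c ≠ '0'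
      · rw [if_pos hcond]
        simp only [true_iff]
        exact ⟨i, le_refl i, hhit.2 hcond⟩
      · rw [if_neg hcond]
        rw [ih j (by omega) hstart']
        constructor
        · rintro ⟨k, hk, h⟩; exact ⟨k, by omega, h⟩
        · rintro ⟨k, hk, h⟩
          rcases Nat.lt_or_ge k j with hlt | hge
          · rcases Nat.eq_or_lt_of_le hk with rfl | h3
            · exact absurd (hhit.1 h) hcond
            · exact absurd h (hmid k h3 hlt)
          · exact ⟨k, hge, h⟩
    · rw [loopB]
      simp only [dif_neg hi, Bool.false_eq_true, false_iff]
      rintro ⟨k, hk, c, h1, h2, _⟩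
      obtain ⟨hlt, -⟩ := List.getElem?_eq_some_iff.1 h1
      omega

-- bridge: Nat.toDigits (the printer behind str(n)) produces the base-10 digits
theorem toDigitsCore_eq : ∀ (f m : Nat) (ds : List Char), 0 < m → m < f →
    Nat.toDigitsCore 10 f m ds = ((Nat.digits 10 m).reverse.map Nat.digitChar) ++ ds := by
  intro f
  induction f with
  | zero => intro m ds h1 h2; omega
  | succ f ih =>
    intro m ds h1 h2
    rw [Nat.toDigitsCore]
    by_cases hm : m / 10 = 0
    · have hmlt : m < 10 := by omega
      simp only [hm, if_pos rfl]
      rw [Nat.digits_def' (by norm_num) h1, hm, Nat.digits_zero]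
      simp [Nat.mod_eq_of_lt hmlt]
    · simp only [if_neg hm]
      rw [ih (m / 10) _ (by omega) (by
        have := Nat.div_lt_self h1 (by norm_num : 1 < 10); omega)]
      rw [Nat.digits_def' (by norm_num) h1]
      simp

theorem toDigits_eq (m : Nat) (h : 0 < m) :
    Nat.toDigits 10 m = (Nat.digits 10 m).reverse.map Nat.digitChar := by
  rw [Nat.toDigits, toDigitsCore_eq (m+1) m [] h (by omega)]
  simp

theorem digitChar_mem (k : Nat) (h : k < 10) : Nat.digitChar k ∈ digitChars := by
  interval_cases k <;> decide

theorem mem_toDigits (m : Nat) (c : Char) (h : c ∈ Nat.toDigits 10 m) : c ∈ digitChars := by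
  rcases Nat.eq_zero_or_pos m with rfl | hm
  · have : c = '0' := by
      have : Nat.toDigits 10 0 = ['0'] := by decide
      rw [this] at h; simpa using h
    rw [this]; decide
  · rw [toDigits_eq m hm] at h
    obtain ⟨k, hk, rfl⟩ := List.mem_map.1 h
    exact digitChar_mem k (Nat.digits_lt_base (by norm_num) (List.mem_reverse.1 hk))

theorem digitChar_inj (a b : Nat) (ha : a < 10) (hb : b < 10)
    (h : Nat.digitChar a = Nat.digitChar b) : a = b := by
  interval_cases a <;> interval_cases b <;> simp_all <;> exact absurd h (by decide)

-- everything after index 0 of str(n) is a decimal digit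
theorem tail_digit (n : Int) (k : Nat) (c : Char)
    (h : (PySem.Int.toChars n)[k+1]? = some c) : c ∈ digitChars := by
  unfold PySem.Int.toChars at h
  by_cases hn : n < 0
  · rw [if_pos hn, List.getElem?_cons_succ] at h
    exact mem_toDigits _ c (List.mem_of_getElem? h)
  · rw [if_neg hn] at h
    exact mem_toDigits _ c (List.mem_of_getElem? h)

theorem hdig_toChars (n : Int) : HDig (PySem.Int.toChars n) := by
  intro k c _ h2
  exact tail_digit n k c h2

theorem hsafe_toChars (n : Int) (hP : Pre_has_double_digits n) :
    HSafe (PySem.Int.toChars n) := by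
  rintro ⟨hlen, c, h0, h1, hnine⟩
  unfold PySem.Int.toChars at hlen h0 h1
  by_cases hn : n < 0
  · rw [if_pos hn] at h0
    simp only [List.getElem?_cons_zero] at h0
    obtain rfl : c = '-' := (Option.some.inj h0).symm
    exact absurd hnine (by decide)
  · rw [if_neg hn] at hlen h0 h1
    set m := n.toNat with hm
    rcases Nat.eq_zero_or_pos m with hm0 | hmpos
    · rw [hm0] at hlen
      have : Nat.toDigits 10 0 = ['0'] := by decide
      rw [this] at hlen; simp at hlen
    · rw [toDigits_eq m hmpos] at hlen h0 h1
      have hL : (Nat.digits 10 m).length = 2 := by simpa using hlen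
      obtain ⟨a, b, hab⟩ := List.length_eq_two.1 hL
      have ha : a < 10 := Nat.digits_lt_base (by norm_num) (by rw [hab]; simp)
      have hb : b < 10 := Nat.digits_lt_base (by norm_num) (by rw [hab]; simp)
      rw [hab] at h0 h1
      simp only [List.reverse_cons, List.reverse_nil, List.nil_append, List.map_append,
        List.map_cons, List.map_nil, List.cons_append, List.singleton_append,
        List.getElem?_cons_zero, List.getElem?_cons_succ] at h0 h1
      have hbc : Nat.digitChar b = c := Option.some.inj h0
      have hac : Nat.digitChar a = c := Option.some.inj h1
      have hba : a = b := digitChar_inj a b ha hb (hac.trans hbc.symm)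
      have hmval : m = a + 10 * a := by
        have := Nat.ofDigits_digits 10 m
        rw [hab, ← hba] at this
        simpa [Nat.ofDigits] using this.symm
      have ha0 : a ≠ 0 := by
        intro h
        rw [h] at hac
        exact nine_ne_zero c hnine (hac.symm ▸ rfl)
      have hnn : n = (m : Int) := by omega
      unfold Pre_has_double_digits at hP
      simp only [List.mem_cons, List.not_mem_nil] at hP
      push_neg at hP
      interval_cases a <;> omega

-- ===== VERDICT (by name: the statement is the Claim_ definition above) =====
theorem has_double_digits_spec : Claim_equal_has_double_digits := by
  intro n _ hpre
  unfold Spec_has_double_digits has_double_digits has_double_digits_alt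
  have hA := loopA_iff (PySem.Int.toChars n) (hdig_toChars n) (hsafe_toChars n hpre)
    (PySem.Int.toChars n).length 0 (by omega)
  have hB := loopB_iff (PySem.Int.toChars n) (PySem.Int.toChars n).length 0 (by omega) (Or.inl rfl)
  rw [Bool.eq_iff_iff, hA, hB]
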